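-- pv_equiv track=rewrite | github.com/Suggestionbotmpw/Document-Creation | inference.py | enforce_strict_counts
-- ===== SOURCE A (Python) =====
-- def enforce_strict_counts(data, num_recs, num_reasons, num_evidence):
--     if not data or "Solutions" not in data:
--         return data
--
--     data["Solutions"] = data["Solutions"][:num_recs]
--
--     for sol in data["Solutions"]:
--         reasons = sol.get("SupportingReasons", [])
--         sol["SupportingReasons"] = reasons[:num_reasons]
--
--         for r in sol["SupportingReasons"]:
--             evidence = r.get("Evidence", [])
--             r["Evidence"] = evidence[:num_evidence]
--
--     return data
-- ===== SOURCE B (Python) =====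
-- def enforce_strict_counts(data, num_recs, num_reasons, num_evidence):
--     if not data or "Solutions" not in data:
--         return data
--
--     levels = [("Solutions", num_recs),
--               ("SupportingReasons", num_reasons),
--               ("Evidence", num_evidence)]
--
--     def trunc(container, idx):
--         key, n = levels[idx]
--         container[key] = container.get(key, [])[:n]
--         if idx + 1 < len(levels):
--             for child in container[key]:
--                 trunc(child, idx + 1)
--
--     trunc(data, 0)
--     return data
-- ===== Notes on version B (the rewrite author's own statement) =====
-- stated objective: alternative
-- what changed: Replaces the three hard-coded nested loops with a schema table levels = [(key, count)] and one recursive helper trunc(container, idx) that truncates the idx-th level and recurses into each child at idx+1, started once at the root.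
import Mathlib
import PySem

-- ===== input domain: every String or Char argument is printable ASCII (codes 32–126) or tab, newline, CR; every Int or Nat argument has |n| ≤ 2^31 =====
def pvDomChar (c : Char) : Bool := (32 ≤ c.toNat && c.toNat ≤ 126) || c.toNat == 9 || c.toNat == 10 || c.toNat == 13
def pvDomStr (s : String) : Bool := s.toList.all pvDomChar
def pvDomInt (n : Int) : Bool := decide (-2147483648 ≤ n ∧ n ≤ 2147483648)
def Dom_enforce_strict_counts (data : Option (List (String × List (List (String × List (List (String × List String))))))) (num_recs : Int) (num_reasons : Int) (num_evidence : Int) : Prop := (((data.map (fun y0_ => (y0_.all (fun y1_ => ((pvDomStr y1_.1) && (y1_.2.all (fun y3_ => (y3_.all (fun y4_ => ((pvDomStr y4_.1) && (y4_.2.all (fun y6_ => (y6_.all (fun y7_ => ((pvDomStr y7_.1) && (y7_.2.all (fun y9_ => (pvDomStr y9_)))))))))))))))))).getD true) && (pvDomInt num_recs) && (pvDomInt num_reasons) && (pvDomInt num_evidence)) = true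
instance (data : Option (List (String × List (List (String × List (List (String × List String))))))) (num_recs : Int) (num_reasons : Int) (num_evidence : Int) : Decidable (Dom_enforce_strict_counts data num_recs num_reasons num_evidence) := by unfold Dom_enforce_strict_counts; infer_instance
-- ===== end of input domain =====

-- B replaces A's three hard-coded nested truncation loops with a schema table of
-- (key, count) levels and ONE recursive helper trunc(container, idx) applied at the root
-- (objective: alternative, schema-driven decomposition, same cost).
-- Both A and B mutate `data` in place in Python; the theorems are about the return value.

-- Model of Python dict assignment d[k] = v on an insertion-ordered association list
-- (overwrite the first occurrence in place; append a new key). Used by both ports.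
def dictAssign {γ : Type} (d : List (String × γ)) (k : String) (v : γ) : List (String × γ) :=
  match d with
  | [] => [(k, v)]
  | (k', v') :: rest => if k' = k then (k, v) :: rest else (k', v') :: dictAssign rest k v

-- Model of Python dict lookup (first match). Used by both ports.
def dictGet? {γ : Type} : List (String × γ) → String → Option γ
  | [], _ => none
  | (k', v) :: rest, k => if k' = k then some v else dictGet? rest k


-- abbreviations for the nested record types (binder shorthand only)
abbrev PyEvd : Type := List (String × List String)
abbrev PySol : Type := List (String × List PyEvd)
abbrev PyDoc : Type := List (String × List PySol)

-- ===== PORT A =====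
def enforce_strict_counts (data : Option (List (String × List (List (String × List (List (String × List String))))))) (num_recs : Int) (num_reasons : Int) (num_evidence : Int) : Option (List (String × List (List (String × List (List (String × List String)))))) :=
  match data with
  | none => none
  | some d =>
    -- if not data or "Solutions" not in data: return data
    if d = [] ∨ dictGet? d "Solutions" = none then some d
    else
      -- data["Solutions"] = data["Solutions"][:num_recs]
      let d1 := dictAssign d "Solutions"
        (PySem.List.slice ((dictGet? d "Solutions").getD []) none (some num_recs))
      -- for sol in data["Solutions"]: …  (in-place mutation of each sol modelled as a map)
      let sols2 := ((dictGet? d1 "Solutions").getD []).map (fun sol =>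
        let reasons := (dictGet? sol "SupportingReasons").getD []
        -- sol["SupportingReasons"] = reasons[:num_reasons]
        let sol1 := dictAssign sol "SupportingReasons"
          (PySem.List.slice reasons none (some num_reasons))
        -- for r in sol["SupportingReasons"]: …
        let rs2 := ((dictGet? sol1 "SupportingReasons").getD []).map (fun r =>
          let evidence := (dictGet? r "Evidence").getD []
          -- r["Evidence"] = evidence[:num_evidence]
          dictAssign r "Evidence" (PySem.List.slice evidence none (some num_evidence)))
        dictAssign sol1 "SupportingReasons" rs2)
      some (dictAssign d1 "Solutions" sols2)

-- ===== PORT B =====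
-- Source B's single recursive helper trunc(container, idx) walks the schema table
--   levels = [("Solutions", num_recs), ("SupportingReasons", num_reasons), ("Evidence", num_evidence)].
-- In Lean the container type differs at each idx, so the one Python recursion is
-- monomorphised into trunc2 (idx = 2), trunc1 (idx = 1), trunc0 (idx = 0), each being
-- the SAME body: container[key] = container.get(key, [])[:n], then (if a deeper level
-- exists) recurse into each child of container[key] (in-place mutation ported as
-- map-then-store of the children).

-- one level step: container[levels[idx][0]] = container.get(levels[idx][0], [])[:levels[idx][1]]
def truncStep {γ : Type} (container : List (String × List γ)) (key : String) (n : Int) : List (String × List γ) :=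
  dictAssign container key (PySem.List.slice ((dictGet? container key).getD []) none (some n))

-- trunc at idx = 2: deepest level, no recursion
def trunc2 (ne : Int) (r : List (String × List String)) : List (String × List String) :=
  truncStep r "Evidence" ne

-- trunc at idx = 1
def trunc1 (nr ne : Int) (s : List (String × List (List (String × List String)))) : List (String × List (List (String × List String))) :=
  let s1 := truncStep s "SupportingReasons" nr
  dictAssign s1 "SupportingReasons" (((dictGet? s1 "SupportingReasons").getD []).map (trunc2 ne))

-- trunc at idx = 0
def trunc0 (nrec nr ne : Int) (d : List (String × List (List (String × List (List (String × List String)))))) : List (String × List (List (String × List (List (String × List String))))) :=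
  let d1 := truncStep d "Solutions" nrec
  dictAssign d1 "Solutions" (((dictGet? d1 "Solutions").getD []).map (trunc1 nr ne))

def enforce_strict_counts_alt (data : Option (List (String × List (List (String × List (List (String × List String))))))) (num_recs : Int) (num_reasons : Int) (num_evidence : Int) : Option (List (String × List (List (String × List (List (String × List String)))))) :=
  match data with
  | none => none
  | some d =>
    if d = [] ∨ dictGet? d "Solutions" = none then some d
    else some (trunc0 num_recs num_reasons num_evidence d)

-- ===== PRECONDITION & SPEC =====
def Spec_enforce_strict_counts (data : Option (List (String × List (List (String × List (List (String × List String))))))) (num_recs : Int) (num_reasons : Int) (num_evidence : Int) (out : Option (List (String × List (List (String × List (List (String × List String))))))) : Prop := out = enforce_strict_counts_alt data num_recs num_reasons num_evidence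
instance (data : Option PyDoc) (num_recs : Int) (num_reasons : Int) (num_evidence : Int) (out : Option PyDoc) : Decidable (Spec_enforce_strict_counts data num_recs num_reasons num_evidence out) := by
  unfold Spec_enforce_strict_counts
  letI i1 : DecidableEq PyEvd := inferInstance
  letI i2 : DecidableEq PySol := inferInstance
  letI i3 : DecidableEq PyDoc := inferInstance
  infer_instance

-- ===== CLAIM (what is proved, stated in full; the proofs are below) =====
def Claim_equal_enforce_strict_counts : Prop := ∀ (data : Option (List (String × List (List (String × List (List (String × List String))))))) (num_recs : Int) (num_reasons : Int) (num_evidence : Int), Dom_enforce_strict_counts data num_recs num_reasons num_evidence → Spec_enforce_strict_counts data num_recs num_reasons num_evidence (enforce_strict_counts data num_recs num_reasons num_evidence)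

-- ===== LEMMAS AND PROOFS =====

-- reading back a just-assigned key returns the assigned value
theorem dictGet?_dictAssign {γ : Type} (d : List (String × γ)) (k : String) (v : γ) :
    dictGet? (dictAssign d k v) k = some v := by
  induction d with
  | nil => simp [dictAssign, dictGet?]
  | cons p rest ih =>
    obtain ⟨k', v'⟩ := p
    by_cases h : k' = k <;> simp [dictAssign, dictGet?, h, ih]

-- assigning the same key twice keeps only the second assignment
theorem dictAssign_dictAssign {γ : Type} (d : List (String × γ)) (k : String) (v w : γ) :
    dictAssign (dictAssign d k v) k w = dictAssign d k w := by
  induction d with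
  | nil => simp [dictAssign]
  | cons p rest ih =>
    obtain ⟨k', v'⟩ := p
    by_cases h : k' = k <;> simp [dictAssign, h, ih]

-- ===== VERDICT (by name: the statement is the Claim_ definition above) =====
theorem enforce_strict_counts_spec : Claim_equal_enforce_strict_counts := by
  intro data num_recs num_reasons num_evidence _
  unfold Spec_enforce_strict_counts enforce_strict_counts enforce_strict_counts_alt
  cases data with
  | none => rfl
  | some d =>
    simp only
    split
    · rfl
    · -- A's inner loop body equals B's trunc at idx = 1, elementwise
      have h1 : ∀ sol : PySol,
          dictAssign sol "SupportingReasons"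
            (((PySem.List.slice ((dictGet? sol "SupportingReasons").getD []) none (some num_reasons))).map (fun r =>
              dictAssign r "Evidence" (PySem.List.slice ((dictGet? r "Evidence").getD []) none (some num_evidence))))
          = trunc1 num_reasons num_evidence sol := by
        intro sol
        unfold trunc1 truncStep
        simp only [dictGet?_dictAssign, Option.getD_some, dictAssign_dictAssign]
        exact congrArg (dictAssign sol "SupportingReasons")
          (List.map_congr_left fun r _ => rfl)
      simp only [trunc0, truncStep, dictGet?_dictAssign, Option.getD_some,
        dictAssign_dictAssign]
      exact congrArg (fun L => some (dictAssign d "Solutions" L))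
        (List.map_congr_left fun sol _ => h1 sol)
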